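-- pv_equiv track=rewrite | github.com/CloudyYoung/cpsc-217 | Assignment/Assignment 4/Asn4.py | tastiestPrey
-- ===== SOURCE A (Python) =====
-- def preries(foodWeb):
-- 	return [x for each in list(foodWeb.values()) for x in each]
--
-- def tastiestPrey(foodWeb):
-- 	# declare the return value variable and get the maximum amount in the food web
-- 	tastiestPrey = []
-- 	maxCount = preries(foodWeb).count(max(preries(foodWeb), key = preries(foodWeb).count))
--
-- 	# because we already have the maximum amount, as long as the preries have
-- 	# the same amount as the maximum amount, all of them are tastiest preries
-- 	for each in preries(foodWeb):
-- 		if preries(foodWeb).count(each) == maxCount: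
-- 			tastiestPrey.append(each)
--
-- 	# remove the repeated names of preries
-- 	tastiestPrey = list(set(tastiestPrey))
-- 	return tastiestPrey
-- ===== SOURCE B (Python) =====
-- def tastiestPrey(foodWeb):
--     # Single counting pass with a dict instead of repeated .count scans.
--     counts = {}
--     for prey in foodWeb.values():
--         for name in prey:
--             counts[name] = counts.get(name, 0) + 1
--     maxCount = max(counts.values())
--     return list(set(name for name, c in counts.items() if c == maxCount))
-- ===== Notes on version B (the rewrite author's own statement) =====
-- stated objective: faster
-- what changed: Replaces A's repeated O(n) list.count scans (inside max and inside the selection loop, each over a freshly re-flattened list) by one counting pass building a dict of frequencies, then selecting the keys whose count equals the maximum of the dict's values.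
import Mathlib
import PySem

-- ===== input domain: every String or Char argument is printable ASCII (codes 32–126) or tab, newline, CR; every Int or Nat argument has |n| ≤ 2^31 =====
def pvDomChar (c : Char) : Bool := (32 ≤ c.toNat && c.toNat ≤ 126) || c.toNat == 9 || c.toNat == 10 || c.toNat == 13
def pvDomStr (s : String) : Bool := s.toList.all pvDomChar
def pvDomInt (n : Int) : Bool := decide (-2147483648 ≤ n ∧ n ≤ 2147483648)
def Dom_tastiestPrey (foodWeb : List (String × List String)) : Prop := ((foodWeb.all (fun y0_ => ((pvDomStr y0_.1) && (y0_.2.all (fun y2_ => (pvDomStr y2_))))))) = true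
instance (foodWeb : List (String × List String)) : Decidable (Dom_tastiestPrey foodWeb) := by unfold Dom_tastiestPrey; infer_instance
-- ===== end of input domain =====

-- B replaces A's repeated list.count scans by one dict counting pass (return values proved equal;
-- neither version mutates its argument).

-- ===== PORT A =====
-- helper preries: [x for each in list(foodWeb.values()) for x in each]
def pvPreries (foodWeb : List (String × List String)) : List String :=
  (foodWeb.map (fun p => p.2)).flatMap (fun each => each)

def tastiestPrey (foodWeb : List (String × List String)) : List String :=
  match PySem.List.max? (pvPreries foodWeb) (fun x => (pvPreries foodWeb).count x) with
  | none => []   -- Python: max() raises ValueError here; excluded by Pre_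
  | some m =>
    let maxCount := (pvPreries foodWeb).count m
    let res := (pvPreries foodWeb).foldl
      (fun acc each => if (pvPreries foodWeb).count each = maxCount then acc ++ [each] else acc) []
    PySem.Set.ofList res

-- ===== PORT B =====
def tastiestPrey_alt (foodWeb : List (String × List String)) : List String :=
  let counts := foodWeb.foldl
    (fun d p => p.2.foldl (fun d name => d.insert name (d.getD name 0 + 1)) d)
    (PySem.Dict.empty : PySem.Dict String Int)
  match PySem.List.max? counts.values (fun v => v) with
  | none => []   -- Python: max() raises ValueError here; excluded by Pre_
  | some maxCount =>
    PySem.Set.ofList (counts.items.filterMap (fun p => if p.2 = maxCount then some p.1 else none))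

-- ===== PRECONDITION & SPEC =====
-- Pre_ excludes exactly the webs whose prey lists flatten to the empty list: there
-- both A and B call max() on an empty sequence and raise ValueError.
def Pre_tastiestPrey (foodWeb : List (String × List String)) : Prop :=
  (foodWeb.map (fun p => p.2)).flatten ≠ []
instance (foodWeb : List (String × List String)) : Decidable (Pre_tastiestPrey foodWeb) := by
  unfold Pre_tastiestPrey; infer_instance

def pvWitness_tastiestPrey : (List (String × List String)) :=
  [("fox", ["rabbit", "mouse"]), ("owl", ["mouse"])]

def Spec_tastiestPrey (foodWeb : List (String × List String)) (out : List String) : Prop := out = tastiestPrey_alt foodWeb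
instance (foodWeb : List (String × List String)) (out : List String) : Decidable (Spec_tastiestPrey foodWeb out) := by unfold Spec_tastiestPrey; infer_instance

-- ===== CLAIM (what is proved, stated in full; the proofs are below) =====
def Claim_equal_tastiestPrey : Prop := ∀ (foodWeb : List (String × List String)), Dom_tastiestPrey foodWeb → Pre_tastiestPrey foodWeb → Spec_tastiestPrey foodWeb (tastiestPrey foodWeb)

-- ===== LEMMAS AND PROOFS =====

-- PySem.Set.ofList commutes with List.filter
theorem pv_ofList_filter (p : String → Bool) (xs : List String) :
    PySem.Set.ofList (xs.filter p) = (PySem.Set.ofList xs).filter p := by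
  induction xs using List.reverseRecOn with
  | nil => rfl
  | append_singleton xs x ih =>
    rw [List.filter_append, PySem.Set.ofList_append_singleton]
    by_cases hx : p x <;> by_cases hmem : x ∈ PySem.Set.ofList xs <;>
      simp [PySem.Set.add, PySem.Set.mem_ofList, hx,
        PySem.Set.ofList_append_singleton, ih, List.mem_filter] <;>
      simp_all [PySem.Set.mem_ofList]

-- filterMap with an if-some is filter
theorem pv_filterMap_if (l : List String) (p : String → Bool) :
    l.filterMap (fun x => if p x then some x else none) = l.filter p := by
  induction l with
  | nil => rfl
  | cons x t ih => by_cases h : p x <;> simp [h, ih]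

-- B's nested counting loop builds Counter of the flattened prey lists
theorem pv_counts_eq_counter (foodWeb : List (String × List String)) :
    foodWeb.foldl (fun d p => p.2.foldl (fun d name => d.insert name (d.getD name 0 + 1)) d)
      (PySem.Dict.empty : PySem.Dict String Int)
    = PySem.Dict.counter (pvPreries foodWeb) := by
  rw [← PySem.Dict.foldl_insert_getD_add_one_eq_counter]
  unfold pvPreries
  rw [List.flatMap_def, List.foldl_flatten, List.foldl_map, List.foldl_map]

-- ===== VERDICT (by name: the statement is the Claim_ definition above) =====
theorem tastiestPrey_spec : Claim_equal_tastiestPrey := by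
  intro fw _ hpre
  unfold Spec_tastiestPrey tastiestPrey tastiestPrey_alt
  rw [pv_counts_eq_counter fw]
  have hpr : pvPreries fw ≠ [] := by
    unfold pvPreries
    rw [List.flatMap_def, List.map_id']
    exact hpre
  cases hm : PySem.List.max? (pvPreries fw) (fun x => (pvPreries fw).count x) with
  | none => exact absurd ((PySem.List.max?_eq_none_iff _ _).mp hm) hpr
  | some m =>
    have hmmem : m ∈ pvPreries fw := PySem.List.max?_mem hm
    have hmmax := PySem.List.max?_isMax hm
    have hvals : (PySem.Dict.counter (pvPreries fw)).values
        = (PySem.Set.ofList (pvPreries fw)).map (fun k => ((pvPreries fw).count k : Int)) := by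
      show (PySem.Dict.counter (pvPreries fw)).items.map (·.2) = _
      rw [PySem.Dict.items_counter, List.map_map]
      rfl
    cases hv : PySem.List.max? (PySem.Dict.counter (pvPreries fw)).values (fun v => v) with
    | none =>
      exfalso
      have hnil := (PySem.List.max?_eq_none_iff _ _).mp hv
      rw [hvals] at hnil
      exact hpr (List.eq_nil_iff_forall_not_mem.mpr (fun y hy =>
        (List.eq_nil_iff_forall_not_mem.mp (List.map_eq_nil_iff.mp hnil)) y
          ((PySem.Set.mem_ofList _ _).mpr hy)))
    | some v =>
      dsimp only
      rw [hv]
      dsimp only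
      have hvmem : v ∈ (PySem.Dict.counter (pvPreries fw)).values := PySem.List.max?_mem hv
      have hvmax := PySem.List.max?_isMax hv
      have hveq : v = ((pvPreries fw).count m : Int) := by
        apply le_antisymm
        · rw [hvals] at hvmem
          obtain ⟨k, hk, rfl⟩ := List.mem_map.mp hvmem
          exact_mod_cast hmmax k ((PySem.Set.mem_ofList _ _).mp hk)
        · exact hvmax _ (by
            rw [hvals]
            exact List.mem_map.mpr ⟨m, (PySem.Set.mem_ofList _ _).mpr hmmem, rfl⟩)
      rw [PySem.List.foldl_append_ite_eq_filter]
      rw [PySem.Dict.items_counter, List.filterMap_map]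
      have hB : (PySem.Set.ofList (pvPreries fw)).filterMap
          ((fun q : String × Int => if q.2 = v then some q.1 else none) ∘
            (fun k => (k, ((pvPreries fw).count k : Int))))
          = (PySem.Set.ofList (pvPreries fw)).filter
              (fun k => decide ((pvPreries fw).count k = (pvPreries fw).count m)) := by
        rw [show ((fun q : String × Int => if q.2 = v then some q.1 else none) ∘
            (fun k => (k, ((pvPreries fw).count k : Int))))
          = (fun k => if (fun k => decide ((pvPreries fw).count k = (pvPreries fw).count m)) k
              then some k else none) from funext fun k => by
          simp [Function.comp, hveq, Nat.cast_inj]]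
        exact pv_filterMap_if _ _
      rw [hB, List.nil_append, pv_ofList_filter]
      rw [PySem.Set.ofList_eq_self_of_nodup _
        ((PySem.Set.nodup_ofList (pvPreries fw)).filter _)]
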